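-- pv_equiv track=rewrite | github.com/DanielDeenik/SustainaTrendTm | frontend/strategy_ai_consultant.py | _determine_trend_category
-- ===== SOURCE A (Python) =====
-- def _determine_trend_category(trend_name: str) -> str:
--     """Determine the most likely category for a trend based on its name"""
--     trend_lower = trend_name.lower()
--
--     if any(term in trend_lower for term in ["carbon", "emission", "climate", "energy", "renewable"]):
--         return "Climate Action"
--     elif any(term in trend_lower for term in ["circular", "waste", "recycl", "reuse"]):
--         return "Circular Economy"
--     elif any(term in trend_lower for term in ["water", "biodiversity", "forest", "conservation"]):
--         return "Natural Resources"
--     elif any(term in trend_lower for term in ["social", "diversity", "inclusion", "equity", "community"]):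
--         return "Social Impact"
--     elif any(term in trend_lower for term in ["governance", "reporting", "disclosure", "compliance"]):
--         return "ESG Governance"
--     elif any(term in trend_lower for term in ["supply", "chain", "procurement", "sourcing"]):
--         return "Supply Chain"
--     else:
--         return "Emerging Trends"
-- ===== SOURCE B (Python) =====
-- _CATEGORIES = ["Climate Action", "Circular Economy", "Natural Resources",
--                "Social Impact", "ESG Governance", "Supply Chain", "Emerging Trends"]
--
-- _KEYWORD_RANK = [
--     ("carbon", 0), ("emission", 0), ("climate", 0), ("energy", 0), ("renewable", 0),
--     ("circular", 1), ("waste", 1), ("recycl", 1), ("reuse", 1),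
--     ("water", 2), ("biodiversity", 2), ("forest", 2), ("conservation", 2),
--     ("social", 3), ("diversity", 3), ("inclusion", 3), ("equity", 3), ("community", 3),
--     ("governance", 4), ("reporting", 4), ("disclosure", 4), ("compliance", 4),
--     ("supply", 5), ("chain", 5), ("procurement", 5), ("sourcing", 5),
-- ]
--
-- def _determine_trend_category(trend_name: str) -> str:
--     """Determine the most likely category for a trend based on its name"""
--     low = trend_name.lower()
--     best = 6
--     for kw, rank in _KEYWORD_RANK:
--         if kw in low:
--             best = min(best, rank)
--     return _CATEGORIES[best]
-- ===== Notes on version B (the rewrite author's own statement) =====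
-- stated objective: alternative
-- what changed: Replaces the six-branch elif chain of any()-scans with a flat keyword-to-rank table folded once to the minimum matched rank, which then indexes a category array; agreement relies on the table's ranks being nondecreasing so the minimum equals the elif chain's first match.
import Mathlib
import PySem

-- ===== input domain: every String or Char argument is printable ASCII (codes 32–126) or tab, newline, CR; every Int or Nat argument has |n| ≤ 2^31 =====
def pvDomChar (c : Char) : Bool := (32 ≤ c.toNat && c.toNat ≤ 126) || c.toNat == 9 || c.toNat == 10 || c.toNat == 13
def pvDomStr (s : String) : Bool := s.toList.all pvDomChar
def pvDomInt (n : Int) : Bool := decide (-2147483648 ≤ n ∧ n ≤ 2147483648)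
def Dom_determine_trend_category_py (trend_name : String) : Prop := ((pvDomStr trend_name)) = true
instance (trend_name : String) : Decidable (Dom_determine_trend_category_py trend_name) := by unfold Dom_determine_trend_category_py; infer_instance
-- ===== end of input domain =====

-- B replaces A's six-branch elif chain with a flat keyword->rank table folded to the
-- minimum matched rank indexing a category array (objective: alternative, same cost).


-- ===== PORT A =====
def determine_trend_category_py (trend_name : String) : String :=
  let trend_lower := PySem.Str.lower trend_name
  if ["carbon", "emission", "climate", "energy", "renewable"].any
      (fun t => PySem.Str.isIn t trend_lower) then "Climate Action"
  else if ["circular", "waste", "recycl", "reuse"].any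
      (fun t => PySem.Str.isIn t trend_lower) then "Circular Economy"
  else if ["water", "biodiversity", "forest", "conservation"].any
      (fun t => PySem.Str.isIn t trend_lower) then "Natural Resources"
  else if ["social", "diversity", "inclusion", "equity", "community"].any
      (fun t => PySem.Str.isIn t trend_lower) then "Social Impact"
  else if ["governance", "reporting", "disclosure", "compliance"].any
      (fun t => PySem.Str.isIn t trend_lower) then "ESG Governance"
  else if ["supply", "chain", "procurement", "sourcing"].any
      (fun t => PySem.Str.isIn t trend_lower) then "Supply Chain"
  else "Emerging Trends"

-- ===== PORT B =====
def pvCategories : List String :=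
  ["Climate Action", "Circular Economy", "Natural Resources",
   "Social Impact", "ESG Governance", "Supply Chain", "Emerging Trends"]

def pvKeywordRank : List (String × Nat) :=
  [("carbon", 0), ("emission", 0), ("climate", 0), ("energy", 0), ("renewable", 0),
   ("circular", 1), ("waste", 1), ("recycl", 1), ("reuse", 1),
   ("water", 2), ("biodiversity", 2), ("forest", 2), ("conservation", 2),
   ("social", 3), ("diversity", 3), ("inclusion", 3), ("equity", 3), ("community", 3),
   ("governance", 4), ("reporting", 4), ("disclosure", 4), ("compliance", 4),
   ("supply", 5), ("chain", 5), ("procurement", 5), ("sourcing", 5)]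

def determine_trend_category_py_alt (trend_name : String) : String :=
  let low := PySem.Str.lower trend_name
  let best := pvKeywordRank.foldl
    (fun b p => if PySem.Str.isIn p.1 low then min b p.2 else b) 6
  pvCategories.getD best ""

-- ===== PRECONDITION & SPEC =====
def Spec_determine_trend_category_py (trend_name : String) (out : String) : Prop := out = determine_trend_category_py_alt trend_name
instance (trend_name : String) (out : String) : Decidable (Spec_determine_trend_category_py trend_name out) := by unfold Spec_determine_trend_category_py; infer_instance

-- ===== CLAIM (what is proved, stated in full; the proofs are below) =====
def Claim_equal_determine_trend_category_py : Prop := ∀ (trend_name : String), Dom_determine_trend_category_py trend_name → Spec_determine_trend_category_py trend_name (determine_trend_category_py trend_name)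

-- ===== LEMMAS AND PROOFS =====

-- first matched rank in the table, 6 if none
def pvFFind (low : String) : List (String × Nat) → Nat
  | [] => 6
  | p :: t => if PySem.Str.isIn p.1 low then p.2 else pvFFind low t

theorem pvFFind_le (low : String) (l : List (String × Nat)) (n : Nat)
    (h : ∀ p ∈ l, p.2 ≤ n) : pvFFind low l ≤ max n 6 := by
  induction l with
  | nil => simp [pvFFind]
  | cons p t ih =>
    simp only [pvFFind]
    split
    · exact le_trans (h p (by simp)) (le_max_left _ _)
    · exact ih (fun q hq => h q (by simp [hq]))

theorem pvGe_ffind (low : String) (l : List (String × Nat)) (k : Nat)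
    (hk : k ≤ 6) (h : ∀ p ∈ l, k ≤ p.2) : k ≤ pvFFind low l := by
  induction l with
  | nil => simpa [pvFFind]
  | cons p t ih =>
    simp only [pvFFind]
    split
    · exact h p (by simp)
    · exact ih (fun q hq => h q (by simp [hq]))

theorem pvFold_eq_ffind (low : String) (l : List (String × Nat)) (acc : Nat)
    (hacc : acc ≤ 6)
    (hle : ∀ p ∈ l, p.2 ≤ 6)
    (hsorted : l.Pairwise (fun p q => p.2 ≤ q.2)) :
    l.foldl (fun b p => if PySem.Str.isIn p.1 low then min b p.2 else b) acc
      = min acc (pvFFind low l) := by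
  induction l generalizing acc with
  | nil => simp [pvFFind, Nat.min_eq_left hacc]
  | cons p t ih =>
    simp only [List.foldl_cons, pvFFind]
    rcases List.pairwise_cons.mp hsorted with ⟨hp, ht⟩
    by_cases hc : PySem.Str.isIn p.1 low = true
    · rw [if_pos hc, if_pos hc,
        ih (min acc p.2) (le_trans (min_le_left _ _) hacc)
          (fun q hq => hle q (by simp [hq])) ht]
      have h1 : p.2 ≤ pvFFind low t :=
        pvGe_ffind low t p.2 (hle p (by simp)) hp
      omega
    · rw [if_neg hc, if_neg hc,
        ih acc hacc (fun q hq => hle q (by simp [hq])) ht]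

set_option maxHeartbeats 2000000 in
theorem pv_main (s : String) :
    determine_trend_category_py s = determine_trend_category_py_alt s := by
  unfold determine_trend_category_py determine_trend_category_py_alt
  dsimp only
  rw [pvFold_eq_ffind (PySem.Str.lower s) pvKeywordRank 6 (by norm_num)
      (by decide) (by decide)]
  have h6 : pvFFind (PySem.Str.lower s) pvKeywordRank ≤ 6 := by
    have := pvFFind_le (PySem.Str.lower s) pvKeywordRank 6 (by decide)
    simpa using this
  rw [Nat.min_eq_right h6]
  simp only [pvFFind, pvKeywordRank, List.any_cons, List.any_nil, Bool.or_false]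
  by_cases h0 : PySem.Str.isIn "carbon" (PySem.Str.lower s) = true <;>
  by_cases h1 : PySem.Str.isIn "emission" (PySem.Str.lower s) = true <;>
  by_cases h2 : PySem.Str.isIn "climate" (PySem.Str.lower s) = true <;>
  by_cases h3 : PySem.Str.isIn "energy" (PySem.Str.lower s) = true <;>
  by_cases h4 : PySem.Str.isIn "renewable" (PySem.Str.lower s) = true <;>
    simp only [h0, h1, h2, h3, h4, Bool.false_or, Bool.true_or, if_true, Bool.or_self] <;>
    first
      | rfl
      | (by_cases g0 : PySem.Str.isIn "circular" (PySem.Str.lower s) = true <;>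
         by_cases g1 : PySem.Str.isIn "waste" (PySem.Str.lower s) = true <;>
         by_cases g2 : PySem.Str.isIn "recycl" (PySem.Str.lower s) = true <;>
         by_cases g3 : PySem.Str.isIn "reuse" (PySem.Str.lower s) = true <;>
           simp only [g0, g1, g2, g3, Bool.false_or, Bool.true_or, ite_true] <;>
           first
             | rfl
             | (by_cases w0 : PySem.Str.isIn "water" (PySem.Str.lower s) = true <;>
                by_cases w1 : PySem.Str.isIn "biodiversity" (PySem.Str.lower s) = true <;>
                by_cases w2 : PySem.Str.isIn "forest" (PySem.Str.lower s) = true <;>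
                by_cases w3 : PySem.Str.isIn "conservation" (PySem.Str.lower s) = true <;>
                  simp only [w0, w1, w2, w3, Bool.false_or, Bool.true_or, ite_true] <;>
                  first
                    | rfl
                    | (by_cases x0 : PySem.Str.isIn "social" (PySem.Str.lower s) = true <;>
                       by_cases x1 : PySem.Str.isIn "diversity" (PySem.Str.lower s) = true <;>
                       by_cases x2 : PySem.Str.isIn "inclusion" (PySem.Str.lower s) = true <;>
                       by_cases x3 : PySem.Str.isIn "equity" (PySem.Str.lower s) = true <;>
                       by_cases x4 : PySem.Str.isIn "community" (PySem.Str.lower s) = true <;>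
                         simp only [x0, x1, x2, x3, x4, Bool.false_or, Bool.true_or, ite_true] <;>
                         first
                           | rfl
                           | (by_cases y0 : PySem.Str.isIn "governance" (PySem.Str.lower s) = true <;>
                              by_cases y1 : PySem.Str.isIn "reporting" (PySem.Str.lower s) = true <;>
                              by_cases y2 : PySem.Str.isIn "disclosure" (PySem.Str.lower s) = true <;>
                              by_cases y3 : PySem.Str.isIn "compliance" (PySem.Str.lower s) = true <;>
                                simp only [y0, y1, y2, y3, Bool.false_or, Bool.true_or, ite_true] <;>
                                first
                                  | rfl
                                  | (by_cases z0 : PySem.Str.isIn "supply" (PySem.Str.lower s) = true <;>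
                                     by_cases z1 : PySem.Str.isIn "chain" (PySem.Str.lower s) = true <;>
                                     by_cases z2 : PySem.Str.isIn "procurement" (PySem.Str.lower s) = true <;>
                                     by_cases z3 : PySem.Str.isIn "sourcing" (PySem.Str.lower s) = true <;>
                                       simp_all [pvCategories])))))

-- ===== VERDICT (by name: the statement is the Claim_ definition above) =====
theorem determine_trend_category_py_spec : Claim_equal_determine_trend_category_py := by
  intro s _
  unfold Spec_determine_trend_category_py
  exact pv_main s
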